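-- pv_equiv track=rewrite | github.com/neutralboolean/Vanity-Phone-Number-Generator | Exercise-Q120/main.py | get_word_format
-- ===== SOURCE A (Python) =====
-- def get_word_format(oldnum, newword):
--     length = len(newword)
--     #if length >= 5:
--         # 0123456789ABCD
--         # 1-800-724-6837
--         # 1-800-PAI^NTER
--         # 1-800-72-INTER
--         #length += 1
--     slice_index = len(oldnum) - length
--     sliced = oldnum[:slice_index]
--     result = ""
--     for i in range(len(sliced)):
--         if i == 1 or i == 4 or i == 7:
--             result += "-"
--         result += sliced[i]
--     return result+"-"+newword
-- ===== SOURCE B (Python) =====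
-- def get_word_format(oldnum, newword):
--     sliced = oldnum[:len(oldnum) - len(newword)]
--     chunks = [sliced[0:1], sliced[1:4], sliced[4:7], sliced[7:]]
--     return "-".join(c for c in chunks if c) + "-" + newword
-- ===== Notes on version B (the rewrite author's own statement) =====
-- stated objective: simpler
-- what changed: Replaced the per-character loop that conditionally inserts dashes before indices 1, 4 and 7 by slicing the prefix into its fixed segments [0:1], [1:4], [4:7], [7:] and joining the non-empty ones with '-'.
import Mathlib
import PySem

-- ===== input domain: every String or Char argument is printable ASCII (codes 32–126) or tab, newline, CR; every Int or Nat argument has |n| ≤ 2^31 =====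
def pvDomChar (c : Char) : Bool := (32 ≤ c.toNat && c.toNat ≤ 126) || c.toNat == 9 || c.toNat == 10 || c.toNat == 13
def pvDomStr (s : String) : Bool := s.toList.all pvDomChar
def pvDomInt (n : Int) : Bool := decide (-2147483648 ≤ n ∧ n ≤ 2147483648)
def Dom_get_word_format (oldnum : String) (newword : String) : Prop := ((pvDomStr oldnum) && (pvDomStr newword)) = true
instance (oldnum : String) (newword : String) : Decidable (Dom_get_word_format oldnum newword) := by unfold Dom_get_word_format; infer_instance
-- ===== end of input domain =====

-- B replaces A's per-character loop (conditional dash before indices 1, 4, 7) by fixed slices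
-- [0:1],[1:4],[4:7],[7:] joined with '-': a simpler chunk-and-join decomposition, same values.

-- ===== PORT A =====
def get_word_format (oldnum : String) (newword : String) : String :=
  let length : Int := PySem.Str.len newword
  let slice_index : Int := PySem.Str.len oldnum - length
  let sliced : List Char := PySem.List.slice oldnum.toList none (some slice_index)
  let result : List Char :=
    (PySem.List.pyRange 0 (sliced.length : Int) 1).foldl
      (fun result i =>
        (if i == 1 || i == 4 || i == 7 then result ++ ['-'] else result)
          ++ [PySem.List.pyGetD sliced i ' ']) []
  String.ofList (result ++ ['-'] ++ newword.toList)

-- ===== PORT B =====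
def get_word_format_alt (oldnum : String) (newword : String) : String :=
  let sliced : List Char :=
    PySem.List.slice oldnum.toList none (some (PySem.Str.len oldnum - PySem.Str.len newword))
  let chunks : List (List Char) :=
    [PySem.List.slice sliced (some 0) (some 1),
     PySem.List.slice sliced (some 1) (some 4),
     PySem.List.slice sliced (some 4) (some 7),
     PySem.List.slice sliced (some 7) none]
  String.ofList (PySem.Chars.join ['-'] (chunks.filter (fun c => !c.isEmpty)) ++ ['-'] ++ newword.toList)

-- ===== PRECONDITION & SPEC =====
def Spec_get_word_format (oldnum : String) (newword : String) (out : String) : Prop := out = get_word_format_alt oldnum newword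
instance (oldnum : String) (newword : String) (out : String) : Decidable (Spec_get_word_format oldnum newword out) := by unfold Spec_get_word_format; infer_instance

-- ===== CLAIM (what is proved, stated in full; the proofs are below) =====
def Claim_equal_get_word_format : Prop := ∀ (oldnum : String) (newword : String), Dom_get_word_format oldnum newword → Spec_get_word_format oldnum newword (get_word_format oldnum newword)

-- ===== LEMMAS AND PROOFS =====

-- A's dash-inserting index loop equals B's chunk-and-join, for any prefix list.
theorem loop_eq_chunks (l : List Char) :
    (PySem.List.pyRange 0 (l.length : Int) 1).foldl
      (fun result i =>
        (if i == 1 || i == 4 || i == 7 then result ++ ['-'] else result)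
          ++ [PySem.List.pyGetD l i ' ']) [] =
    PySem.Chars.join ['-']
      (([l.take 1, (l.drop 1).take 3, (l.drop 4).take 3, l.drop 7]).filter
        (fun c => !c.isEmpty)) := by
  match l with
  | [] =>
      simp [PySem.Chars.join, List.intercalate]
  | [x0] =>
      have h : PySem.List.pyRange 0 (([x0] : List Char).length : Int) 1 = [0] := by
        simp [PySem.List.pyRange_one, List.range_succ]
      rw [h]; simp [PySem.List.pyGetD, PySem.List.pyGet?, PySem.List.pyIdx?, PySem.Chars.join, List.intercalate]
  | [x0, x1] =>
      have h : PySem.List.pyRange 0 (([x0, x1] : List Char).length : Int) 1 = [0, 1] := by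
        simp [PySem.List.pyRange_one, List.range_succ]
      rw [h]; simp [PySem.List.pyGetD, PySem.List.pyGet?, PySem.List.pyIdx?, PySem.Chars.join, List.intercalate, List.intersperse]
  | [x0, x1, x2] =>
      have h : PySem.List.pyRange 0 (([x0, x1, x2] : List Char).length : Int) 1 = [0, 1, 2] := by
        simp [PySem.List.pyRange_one, List.range_succ]
      rw [h]; simp [PySem.List.pyGetD, PySem.List.pyGet?, PySem.List.pyIdx?, PySem.Chars.join, List.intercalate, List.intersperse]
  | [x0, x1, x2, x3] =>
      have h : PySem.List.pyRange 0 (([x0, x1, x2, x3] : List Char).length : Int) 1 = [0, 1, 2, 3] := by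
        simp [PySem.List.pyRange_one, List.range_succ]
      rw [h]; simp [PySem.List.pyGetD, PySem.List.pyGet?, PySem.List.pyIdx?, PySem.Chars.join, List.intercalate, List.intersperse]
  | [x0, x1, x2, x3, x4] =>
      have h : PySem.List.pyRange 0 (([x0, x1, x2, x3, x4] : List Char).length : Int) 1 = [0, 1, 2, 3, 4] := by
        simp [PySem.List.pyRange_one, List.range_succ]
      rw [h]; simp [PySem.List.pyGetD, PySem.List.pyGet?, PySem.List.pyIdx?, PySem.Chars.join, List.intercalate, List.intersperse]
  | [x0, x1, x2, x3, x4, x5] =>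
      have h : PySem.List.pyRange 0 (([x0, x1, x2, x3, x4, x5] : List Char).length : Int) 1 = [0, 1, 2, 3, 4, 5] := by
        simp [PySem.List.pyRange_one, List.range_succ]
      rw [h]; simp [PySem.List.pyGetD, PySem.List.pyGet?, PySem.List.pyIdx?, PySem.Chars.join, List.intercalate, List.intersperse]
  | [x0, x1, x2, x3, x4, x5, x6] =>
      have h : PySem.List.pyRange 0 (([x0, x1, x2, x3, x4, x5, x6] : List Char).length : Int) 1 = [0, 1, 2, 3, 4, 5, 6] := by
        simp [PySem.List.pyRange_one, List.range_succ]
      rw [h]; simp [PySem.List.pyGetD, PySem.List.pyGet?, PySem.List.pyIdx?, PySem.Chars.join, List.intercalate, List.intersperse]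
  | x0 :: x1 :: x2 :: x3 :: x4 :: x5 :: x6 :: x7 :: t =>
      set m := x0 :: x1 :: x2 :: x3 :: x4 :: x5 :: x6 :: x7 :: t with hm
      have hsplit : PySem.List.pyRange 0 (m.length : Int) 1
          = PySem.List.pyRange 0 8 1 ++ PySem.List.pyRange 8 (m.length : Int) 1 :=
        PySem.List.pyRange_one_append 0 8 _ (by norm_num) (by simp [hm]; omega)
      rw [hsplit, List.foldl_append]
      have hr8 : PySem.List.pyRange 0 (8 : Int) 1 = [0, 1, 2, 3, 4, 5, 6, 7] := by
        simp [PySem.List.pyRange_one, List.range_succ]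
      rw [hr8]
      have hhead : ([0, 1, 2, 3, 4, 5, 6, 7] : List Int).foldl
          (fun result i =>
            (if i == 1 || i == 4 || i == 7 then result ++ ['-'] else result)
              ++ [PySem.List.pyGetD m i ' ']) []
          = [x0, '-', x1, x2, x3, '-', x4, x5, x6, '-', x7] := by
        rw [hm]; norm_num [PySem.List.pyGetD_ofNat']
      rw [hhead]
      have hcong : ∀ (acc : List Char) (i : Int), i ∈ PySem.List.pyRange 8 (m.length : Int) 1 →
          ((if i == 1 || i == 4 || i == 7 then acc ++ ['-'] else acc)
              ++ [PySem.List.pyGetD m i ' ']) = acc ++ [PySem.List.pyGetD m i ' '] := by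
        intro acc i hi
        rw [PySem.List.mem_pyRange_one] at hi
        have : (i == 1 || i == 4 || i == 7) = false := by simp; omega
        rw [this]; simp
      have h1 :
          (PySem.List.pyRange 8 (m.length : Int) 1).foldl
            (fun result i =>
              (if i == 1 || i == 4 || i == 7 then result ++ ['-'] else result)
                ++ [PySem.List.pyGetD m i ' ']) [x0, '-', x1, x2, x3, '-', x4, x5, x6, '-', x7]
          = (PySem.List.pyRange 8 (m.length : Int) 1).foldl
              (fun acc i => acc ++ [PySem.List.pyGetD m i ' ']) [x0, '-', x1, x2, x3, '-', x4, x5, x6, '-', x7] :=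
        PySem.List.foldl_congr_mem _ _ _ _ hcong
      have h2 :
          (PySem.List.pyRange 8 (m.length : Int) 1).foldl
              (fun acc i => acc ++ [PySem.List.pyGetD m i ' ']) [x0, '-', x1, x2, x3, '-', x4, x5, x6, '-', x7]
          = (m.drop ((8 : Int)).toNat).foldl (fun acc ch => acc ++ [ch]) [x0, '-', x1, x2, x3, '-', x4, x5, x6, '-', x7] :=
        PySem.List.foldl_pyRange_pyGetD' m ' ' (fun acc ch => acc ++ [ch]) _ (by norm_num)
      rw [h1, h2, PySem.List.foldl_append_singleton_eq_self]
      simp [hm, PySem.Chars.join, List.intercalate, List.intersperse]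

-- ===== VERDICT (by name: the statement is the Claim_ definition above) =====
theorem get_word_format_spec : Claim_equal_get_word_format := by
  intro oldnum newword _
  unfold Spec_get_word_format get_word_format get_word_format_alt
  simp only
  rw [loop_eq_chunks]
  congr 2
  simp [PySem.List.slice_toNat, PySem.List.slice_from]
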